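-- pv_equiv track=rewrite | github.com/kocopelly/nashville-folk-session | scripts/tta-build/tta-scraper.py | extract_abc_body
-- ===== SOURCE A (Python) =====
-- def extract_abc_body(abc_text):
--     """Extract just the tune body (notes) from ABC, stripping header lines."""
--     lines = []
--     in_body = False
--     for line in abc_text.split('\n'):
--         line = line.strip()
--         if not line:
--             continue
--         # Header lines: single letter + colon
--         if len(line) >= 2 and line[1] == ':' and line[0].isalpha() and not in_body:
--             if line[0] == 'K':  # K: is last header, body follows
--                 in_body = True
--             continue
--         if in_body or (not (len(line) >= 2 and line[1] == ':' and line[0].isalpha())):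
--             in_body = True
--             lines.append(line)
--     return '\n'.join(lines)
-- ===== SOURCE B (Python) =====
-- def extract_abc_body(abc_text):
--     """Extract just the tune body (notes) from ABC, stripping header lines."""
--     lines = [l for l in (raw.strip() for raw in abc_text.split('\n')) if l]
--     start = len(lines)
--     for i, line in enumerate(lines):
--         if not (len(line) >= 2 and line[1] == ':' and line[0].isalpha()):
--             start = i
--             break
--         if line[0] == 'K':
--             start = i + 1
--             break
--     return '\n'.join(lines[start:])
-- ===== Notes on version B (the rewrite author's own statement) =====
-- stated objective: simpler
-- what changed: Replaces the single stateful accumulate-with-flag loop by three phases: filter the stripped non-empty lines, locate the body-start index (first non-header line, or just past the first K: header), and join the tail slice.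
import Mathlib
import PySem

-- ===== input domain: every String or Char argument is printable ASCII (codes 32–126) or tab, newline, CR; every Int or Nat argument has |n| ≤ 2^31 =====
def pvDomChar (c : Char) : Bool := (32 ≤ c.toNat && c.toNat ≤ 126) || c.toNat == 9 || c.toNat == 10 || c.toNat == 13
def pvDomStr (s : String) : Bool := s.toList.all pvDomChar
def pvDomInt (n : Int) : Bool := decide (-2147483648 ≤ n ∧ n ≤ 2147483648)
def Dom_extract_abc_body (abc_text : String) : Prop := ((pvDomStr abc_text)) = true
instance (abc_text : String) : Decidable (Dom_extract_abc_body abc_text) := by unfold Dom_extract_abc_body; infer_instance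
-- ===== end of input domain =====

-- B replaces A's stateful accumulate-with-flag loop by filter / find-body-start / join-tail phases (same behaviour, simpler decomposition).

-- ===== PORT A =====
-- s.split('\n') with a non-empty literal separator never raises; split? is none only for sep = ""
def extract_abc_body (abc_text : String) : String :=
  let st := ((PySem.Str.split? abc_text "\n").getD []).foldl
    (fun (st : List String × Bool) line0 =>
      let line := PySem.Str.strip line0
      if line = "" then st
      else if decide (2 ≤ PySem.Str.len line) && (PySem.Str.pyGet? line 1 == some ':')
              && (PySem.Str.pyGet? line 0).any PySem.Chars.isalpha && !st.2 then
        if PySem.Str.pyGet? line 0 == some 'K' then (st.1, true) else st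
      else if st.2 || !(decide (2 ≤ PySem.Str.len line) && (PySem.Str.pyGet? line 1 == some ':')
              && (PySem.Str.pyGet? line 0).any PySem.Chars.isalpha) then
        (st.1 ++ [line], true)
      else st)
    ([], false)
  PySem.Str.join "\n" st.1

-- ===== PORT B =====
-- B's header test: len(line) >= 2 and line[1] == ':' and line[0].isalpha()
def pvIsHeader (line : String) : Bool :=
  decide (2 ≤ PySem.Str.len line) && (PySem.Str.pyGet? line 1 == some ':')
    && (PySem.Str.pyGet? line 0).any PySem.Chars.isalpha

-- B's enumerate-with-break loop locating the first body line
def pvBodyStart : List String → Nat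
  | [] => 0
  | l :: ls =>
    if !pvIsHeader l then 0
    else if PySem.Str.pyGet? l 0 == some 'K' then 1
    else pvBodyStart ls + 1

def extract_abc_body_alt (abc_text : String) : String :=
  let lines := (((PySem.Str.split? abc_text "\n").getD []).map PySem.Str.strip).filter (· ≠ "")
  PySem.Str.join "\n" (lines.drop (pvBodyStart lines))

-- ===== PRECONDITION & SPEC =====
def Spec_extract_abc_body (abc_text : String) (out : String) : Prop := out = extract_abc_body_alt abc_text
instance (abc_text : String) (out : String) : Decidable (Spec_extract_abc_body abc_text out) := by unfold Spec_extract_abc_body; infer_instance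

-- ===== CLAIM (what is proved, stated in full; the proofs are below) =====
def Claim_equal_extract_abc_body : Prop := ∀ (abc_text : String), Dom_extract_abc_body abc_text → Spec_extract_abc_body abc_text (extract_abc_body abc_text)

-- ===== LEMMAS AND PROOFS =====

-- A's loop step on an already-stripped non-empty line
def pvStepCore (st : List String × Bool) (line : String) : List String × Bool :=
  if pvIsHeader line && !st.2 then
    if PySem.Str.pyGet? line 0 == some 'K' then (st.1, true) else st
  else if st.2 || !pvIsHeader line then (st.1 ++ [line], true)
  else st

-- a strip-then-skip-empties loop is the same loop over the stripped, filtered lines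
lemma pvFoldStripFilter {β : Type} (g : β → String → β) (xs : List String) (st : β) :
    xs.foldl (fun st l => if PySem.Str.strip l = "" then st else g st (PySem.Str.strip l)) st
      = ((xs.map PySem.Str.strip).filter (· ≠ "")).foldl g st := by
  induction xs generalizing st with
  | nil => rfl
  | cons x xs ih =>
    simp only [List.foldl_cons, List.map_cons, List.filter_cons]
    by_cases h : PySem.Str.strip x = ""
    · simpa [h] using ih st
    · simpa [h] using ih (g st (PySem.Str.strip x))

-- once in_body is set, every remaining line is appended
lemma pvFoldTrue (L : List String) (acc : List String) :
    L.foldl pvStepCore (acc, true) = (acc ++ L, true) := by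
  induction L generalizing acc with
  | nil => simp
  | cons l ls ih => simp [pvStepCore, ih]

-- from the initial state, A's loop keeps exactly the lines from B's body-start index on
lemma pvFoldFalse (L : List String) (acc : List String) :
    (L.foldl pvStepCore (acc, false)).1 = acc ++ L.drop (pvBodyStart L) := by
  induction L generalizing acc with
  | nil => simp
  | cons l ls ih =>
    by_cases hH : pvIsHeader l = true
    · by_cases hK : PySem.List.pyGet? l.toList 0 = some 'K'
      · simp [pvStepCore, pvBodyStart, hH, hK, pvFoldTrue]
      · simp [pvStepCore, pvBodyStart, hH, hK, ih]
    · simp [pvStepCore, pvBodyStart, hH, pvFoldTrue]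

-- ===== VERDICT (by name: the statement is the Claim_ definition above) =====
theorem extract_abc_body_spec : Claim_equal_extract_abc_body := by
  intro abc_text _
  show extract_abc_body abc_text = extract_abc_body_alt abc_text
  unfold extract_abc_body extract_abc_body_alt
  have hstep : (fun (st : List String × Bool) line0 =>
      let line := PySem.Str.strip line0
      if line = "" then st
      else if decide (2 ≤ PySem.Str.len line) && (PySem.Str.pyGet? line 1 == some ':')
              && (PySem.Str.pyGet? line 0).any PySem.Chars.isalpha && !st.2 then
        if PySem.Str.pyGet? line 0 == some 'K' then (st.1, true) else st
      else if st.2 || !(decide (2 ≤ PySem.Str.len line) && (PySem.Str.pyGet? line 1 == some ':')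
              && (PySem.Str.pyGet? line 0).any PySem.Chars.isalpha) then
        (st.1 ++ [line], true)
      else st)
      = (fun st l => if PySem.Str.strip l = "" then st else pvStepCore st (PySem.Str.strip l)) := rfl
  rw [hstep, pvFoldStripFilter]
  show PySem.Str.join "\n" (List.foldl pvStepCore ([], false) _).1 = _
  rw [pvFoldFalse]
  rfl
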